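-- pv_equiv track=rewrite | github.com/Programmers-Study-2024/algorithm-study | week6/p82612_python_yujin.py | solution
-- ===== SOURCE A (Python) =====
-- def solution(price, money, count):
--     answer = 0
--
--     for i in range(0, count) :
--         answer+=price*(i+1)
--     if( answer < money) : return 0
--     else :
--         answer-=money
--         return answer
-- ===== SOURCE B (Python) =====
-- def solution(price, money, count):
--     total = price * count * (count + 1) // 2 if count > 0 else 0
--     return total - money if total >= money else 0
-- ===== Notes on version B (the rewrite author's own statement) =====
-- stated objective: faster
-- what changed: replaces the O(count) accumulation loop by the closed-form arithmetic-series formula price*count*(count+1)//2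
import Mathlib
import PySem

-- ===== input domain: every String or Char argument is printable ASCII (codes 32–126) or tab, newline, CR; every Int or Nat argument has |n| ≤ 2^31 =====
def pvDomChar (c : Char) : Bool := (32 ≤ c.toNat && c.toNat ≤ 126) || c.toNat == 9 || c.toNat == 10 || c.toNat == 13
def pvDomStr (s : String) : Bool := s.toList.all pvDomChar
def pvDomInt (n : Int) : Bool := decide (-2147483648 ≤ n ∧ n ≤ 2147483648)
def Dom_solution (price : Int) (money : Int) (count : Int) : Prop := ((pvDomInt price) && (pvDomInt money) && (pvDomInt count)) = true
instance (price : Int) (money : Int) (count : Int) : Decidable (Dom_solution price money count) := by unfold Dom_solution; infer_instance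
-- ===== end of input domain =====

-- B replaces A's O(count) accumulation loop by the closed-form arithmetic series price*count*(count+1)//2 (faster).

-- ===== PORT A =====
def solution (price : Int) (money : Int) (count : Int) : Int :=
  let answer : Int :=
    (PySem.List.pyRange 0 count 1).foldl (fun answer i => answer + price * (i + 1)) 0
  if answer < money then 0
  else answer - money

-- ===== PORT B =====
def solution_alt (price : Int) (money : Int) (count : Int) : Int :=
  let total : Int := if count > 0 then PySem.Int.floordiv (price * count * (count + 1)) 2 else 0
  if total ≥ money then total - money else 0

-- ===== PRECONDITION & SPEC =====
def Spec_solution (price : Int) (money : Int) (count : Int) (out : Int) : Prop := out = solution_alt price money count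
instance (price : Int) (money : Int) (count : Int) (out : Int) : Decidable (Spec_solution price money count out) := by unfold Spec_solution; infer_instance

-- ===== CLAIM (what is proved, stated in full; the proofs are below) =====
def Claim_equal_solution : Prop := ∀ (price : Int) (money : Int) (count : Int), Dom_solution price money count → Spec_solution price money count (solution price money count)

-- ===== LEMMAS AND PROOFS =====

theorem pvSum_loop (price : Int) (n : Nat) :
    2 * ((PySem.List.pyRange 0 (n : Int) 1).foldl (fun a i => a + price * (i + 1)) 0)
      = price * (n : Int) * ((n : Int) + 1) := by
  induction n with
  | zero => simp
  | succ k ih =>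
    have h : PySem.List.pyRange 0 ((k : Int) + 1) 1
        = PySem.List.pyRange 0 (k : Int) 1 ++ [(k : Int)] := by
      exact PySem.List.pyRange_one_succ_right (by exact_mod_cast Nat.zero_le k)
    push_cast
    rw [h, List.foldl_append]
    simp only [List.foldl]
    ring_nf
    ring_nf at ih
    omega

theorem pvAnswer_eq (price count : Int) :
    ((PySem.List.pyRange 0 count 1).foldl (fun a i => a + price * (i + 1)) 0)
      = (if count > 0 then PySem.Int.floordiv (price * count * (count + 1)) 2 else 0) := by
  by_cases hc : count > 0
  · simp only [hc, if_pos]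
    have hn : ((count.toNat : Int)) = count := Int.toNat_of_nonneg (le_of_lt hc)
    have h2 := pvSum_loop price count.toNat
    rw [hn] at h2
    rw [PySem.Int.floordiv, ← h2, Int.mul_fdiv_cancel_left _ (by norm_num)]
  · simp only [hc, if_false]
    rw [PySem.List.pyRange_one_eq_nil (by omega)]
    simp

-- ===== VERDICT (by name: the statement is the Claim_ definition above) =====
theorem solution_spec : Claim_equal_solution := by
  intro price money count _
  unfold Spec_solution solution solution_alt
  rw [pvAnswer_eq]
  set t : Int := if count > 0 then PySem.Int.floordiv (price * count * (count + 1)) 2 else 0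
  by_cases h : t < money
  · simp [h, not_le.mpr h]
  · simp [h, not_lt.mp h]
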